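-- pv_equiv track=rewrite | github.com/ep-code-box/CoE-RagPipeline | scripts/impact.py | impacted_modules
-- ===== SOURCE A (Python) =====
-- from collections import defaultdict, deque
-- from typing import Dict, Iterable, List, Set, Tuple
--
-- def impacted_modules(changed: Iterable[str], rev: Dict[str, Set[str]]) -> Set[str]:
--     impacted: Set[str] = set(changed)
--     q = deque(changed)
--     while q:
--         cur = q.popleft()
--         for dep in rev.get(cur, ()):  # who depends on cur
--             if dep not in impacted:
--                 impacted.add(dep)
--                 q.append(dep)
--     return impacted
-- ===== SOURCE B (Python) =====
-- def impacted_modules(changed, rev):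
--     impacted = set(changed)
--     while True:
--         nxt = set(impacted)
--         for node in impacted:
--             nxt.update(rev.get(node, ()))
--         if len(nxt) == len(impacted):
--             return impacted
--         impacted = nxt
-- ===== Notes on version B (the rewrite author's own statement) =====
-- stated objective: alternative
-- what changed: Replaces the deque worklist BFS by naive fixed-point iteration: each round rebuilds the one-step image of the whole current set (nxt = impacted plus every rev-neighbour of every impacted node) and stops when the size stops growing, so there is no queue, no frontier and no per-node visited/unvisited bookkeeping.
import Mathlib
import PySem

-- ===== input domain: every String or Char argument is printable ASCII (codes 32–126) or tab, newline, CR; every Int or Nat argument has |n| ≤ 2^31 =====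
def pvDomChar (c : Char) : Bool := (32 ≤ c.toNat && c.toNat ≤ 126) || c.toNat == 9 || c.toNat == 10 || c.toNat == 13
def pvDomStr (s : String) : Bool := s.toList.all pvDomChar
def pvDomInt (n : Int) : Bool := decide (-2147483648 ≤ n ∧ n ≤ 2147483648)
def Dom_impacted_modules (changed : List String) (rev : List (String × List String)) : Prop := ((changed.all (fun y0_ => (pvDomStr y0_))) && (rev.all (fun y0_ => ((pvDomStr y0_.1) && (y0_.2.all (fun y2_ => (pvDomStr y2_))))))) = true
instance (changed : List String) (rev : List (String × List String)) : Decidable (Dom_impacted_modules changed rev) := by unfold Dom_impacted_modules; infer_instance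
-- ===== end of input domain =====

-- B replaces A's deque worklist BFS by naive fixed-point iteration (each round rebuilds the
-- one-step image of the whole current set and stops when its size stops growing); same result,
-- no queue/frontier/visited bookkeeping (objective: alternative, not faster).

-- ===== PORT A =====
-- inner body of A's loop: 'if dep not in impacted: impacted.add(dep); q.append(dep)';
-- state is (impacted, the queue tail being appended to)
def pvVisit (t : PySem.Set String × List String) (dep : String) : PySem.Set String × List String :=
  if PySem.Set.contains t.1 dep then t else (PySem.Set.add t.1 dep, t.2 ++ [dep])

-- rev.get(cur, ()) — empty default
def pvDeps (rev : List (String × List String)) (cur : String) : List String :=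
  PySem.Dict.getD (PySem.Dict.mk rev) cur []

-- totality fuel for both while-loops: #pops (A) / #rounds (B) ever needed is at most
-- len(changed) + total size of rev's values + 1; proved sufficient below, so the guard never fires
def pvFuel (changed : List String) (rev : List (String × List String)) : Nat :=
  changed.length + (rev.map (fun p => p.2.length)).sum + 1

-- while q: cur = q.popleft(); for dep in rev.get(cur, ()): ...
def pvLoopA (rev : List (String × List String)) : Nat → PySem.Set String → List String → PySem.Set String
  | _, imp, [] => imp
  | 0, imp, _ => imp
  | fuel+1, imp, cur :: q =>
      let s := (pvDeps rev cur).foldl pvVisit (imp, q)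
      pvLoopA rev fuel s.1 s.2

def impacted_modules (changed : List String) (rev : List (String × List String)) : List String :=
  pvLoopA rev (pvFuel changed rev) (PySem.Set.ofList changed) changed

-- ===== PORT B =====
-- one round: nxt = set(impacted); for node in impacted: nxt.update(rev.get(node, ()))
def pvImage (rev : List (String × List String)) (imp : PySem.Set String) : PySem.Set String :=
  imp.foldl (fun nxt node => PySem.Set.update nxt (pvDeps rev node)) (PySem.Set.ofList imp)

-- while True: ... if len(nxt) == len(impacted): return impacted; impacted = nxt
def pvLoopB (rev : List (String × List String)) : Nat → PySem.Set String → PySem.Set String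
  | 0, imp => imp
  | fuel+1, imp =>
      let nxt := pvImage rev imp
      if PySem.Set.len nxt = PySem.Set.len imp then imp else pvLoopB rev fuel nxt

def impacted_modules_alt (changed : List String) (rev : List (String × List String)) : List String :=
  pvLoopB rev (pvFuel changed rev) (PySem.Set.ofList changed)

-- ===== PRECONDITION & SPEC =====
def Spec_impacted_modules (changed : List String) (rev : List (String × List String)) (out : List String) : Prop := out = impacted_modules_alt changed rev
instance (changed : List String) (rev : List (String × List String)) (out : List String) : Decidable (Spec_impacted_modules changed rev out) := by unfold Spec_impacted_modules; infer_instance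

-- ===== CLAIM (what is proved, stated in full; the proofs are below) =====
def Claim_equal_impacted_modules : Prop := ∀ (changed : List String) (rev : List (String × List String)), Dom_impacted_modules changed rev → Spec_impacted_modules changed rev (impacted_modules changed rev)

-- ===== LEMMAS AND PROOFS =====

-- one whole A-level: scan a list of nodes, pair state (impacted, newly appended)
def pvRound (rev : List (String × List String)) (imp : PySem.Set String) (f : List String) :
    PySem.Set String × List String :=
  f.foldl (fun s cur => (pvDeps rev cur).foldl pvVisit s) (imp, [])

-- all strings that can ever be newly discovered
def pvU (rev : List (String × List String)) : List String := (rev.map Prod.snd).flatten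

-- how many universe members are not yet impacted
def pvRem (rev : List (String × List String)) (imp : List String) : Nat :=
  ((PySem.List.dedup (pvU rev)).filter (fun x => decide (x ∉ imp))).length

-- the measure: the exact number of pops A still performs
def pvM (rev : List (String × List String)) (imp q : List String) : Nat :=
  q.length + pvRem rev imp

theorem pvMem_deps (rev : List (String × List String)) (c x : String)
    (h : x ∈ pvDeps rev c) : x ∈ pvU rev := by
  induction rev with
  | nil => simp [pvDeps, PySem.Dict.getD, PySem.Dict.get?] at h
  | cons p t ih =>
      obtain ⟨k, v⟩ := p
      simp only [pvDeps, PySem.Dict.getD, PySem.Dict.get?_mk_cons] at h ih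
      by_cases hc : k == c
      · simp only [hc, if_true, Option.getD_some] at h
        simp only [pvU, List.map_cons, List.flatten_cons, List.mem_append]
        exact Or.inl h
      · simp only [hc, if_false, Bool.false_eq_true] at h
        have := ih h
        simp only [pvU, List.map_cons, List.flatten_cons, List.mem_append]
        exact Or.inr (by simpa [pvU] using this)

theorem pvVisit_shift (l : List String) (imp : List String) (acc : List String) :
    l.foldl pvVisit (imp, acc) = ((l.foldl pvVisit (imp, [])).1, acc ++ (l.foldl pvVisit (imp, [])).2) := by
  induction l generalizing imp acc with
  | nil => simp
  | cons hd tl ih =>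
      simp only [List.foldl_cons]
      by_cases hc : PySem.Set.contains imp hd
      · simp only [pvVisit, hc, if_true]
        exact ih imp acc
      · simp only [pvVisit, hc, if_false, Bool.false_eq_true, List.nil_append]
        rw [ih (PySem.Set.add imp hd) (acc ++ [hd]), ih (PySem.Set.add imp hd) [hd]]
        simp

theorem pvVisit_pkg (l : List String) (imp : List String) :
    (l.foldl pvVisit (imp, [])).1 = imp ++ (l.foldl pvVisit (imp, [])).2 ∧
    (l.foldl pvVisit (imp, [])).2.Nodup ∧
    ∀ x ∈ (l.foldl pvVisit (imp, [])).2, x ∈ l ∧ x ∉ imp := by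
  induction l generalizing imp with
  | nil => simp
  | cons hd tl ih =>
      simp only [List.foldl_cons]
      by_cases hc : PySem.Set.contains imp hd
      · have hmem : hd ∈ imp := by simpa [PySem.Set.contains] using hc
        simp only [pvVisit, hc, if_true]
        obtain ⟨h1, h2, h3⟩ := ih imp
        exact ⟨h1, h2, fun x hx => ⟨List.mem_cons_of_mem _ (h3 x hx).1, (h3 x hx).2⟩⟩
      · have hmem : hd ∉ imp := by simpa [PySem.Set.contains] using hc
        have hadd : PySem.Set.add imp hd = imp ++ [hd] := by
          simp [PySem.Set.add, PySem.Set.contains] at hc ⊢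
          intro hin; exact absurd hin hc
        simp only [pvVisit, hc, if_false, Bool.false_eq_true, List.nil_append]
        rw [pvVisit_shift tl (PySem.Set.add imp hd) [hd], hadd]
        simp only [List.singleton_append]
        obtain ⟨h1, h2, h3⟩ := ih (imp ++ [hd])
        refine ⟨?_, ?_, ?_⟩
        · simp [h1]
        · simp only [List.nodup_cons]
          exact ⟨fun hin => by simpa using ((h3 hd hin).2), h2⟩
        · intro x hx
          simp only [List.mem_cons] at hx
          rcases hx with rfl | hx
          · exact ⟨List.mem_cons_self, hmem⟩
          · have := h3 x hx
            simp only [List.mem_append, List.mem_singleton] at this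
            exact ⟨List.mem_cons_of_mem _ this.1, fun hin => this.2 (Or.inl hin)⟩

theorem pvRound_shift (rev : List (String × List String)) (f : List String) (imp acc : List String) :
    f.foldl (fun s cur => (pvDeps rev cur).foldl pvVisit s) (imp, acc) =
      ((pvRound rev imp f).1, acc ++ (pvRound rev imp f).2) := by
  induction f generalizing imp acc with
  | nil => simp [pvRound]
  | cons c f' ih =>
      simp only [pvRound, List.foldl_cons]
      rw [pvVisit_shift (pvDeps rev c) imp acc, pvVisit_shift (pvDeps rev c) imp []]
      rw [ih _ (acc ++ _), ih _ ([] ++ _)]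
      simp [pvRound]

theorem pvRound_pkg (rev : List (String × List String)) (f : List String) (imp : List String) :
    (pvRound rev imp f).1 = imp ++ (pvRound rev imp f).2 ∧
    (pvRound rev imp f).2.Nodup ∧
    ∀ x ∈ (pvRound rev imp f).2, x ∈ pvU rev ∧ x ∉ imp := by
  induction f generalizing imp with
  | nil => simp [pvRound]
  | cons c f' ih =>
      simp only [pvRound, List.foldl_cons]
      rw [pvVisit_shift (pvDeps rev c) imp []]
      obtain ⟨g1, g2, g3⟩ := pvVisit_pkg (pvDeps rev c) imp
      set n1 := (List.foldl pvVisit (imp, []) (pvDeps rev c)).2 with hn1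
      set i1 := (List.foldl pvVisit (imp, []) (pvDeps rev c)).1 with hi1
      rw [show f'.foldl (fun s cur => (pvDeps rev cur).foldl pvVisit s) (i1, [] ++ n1)
            = ((pvRound rev i1 f').1, ([] ++ n1) ++ (pvRound rev i1 f').2) from pvRound_shift rev f' i1 ([] ++ n1)]
      obtain ⟨h1, h2, h3⟩ := ih i1
      simp only [List.nil_append]
      refine ⟨?_, ?_, ?_⟩
      · rw [h1, g1]; simp
      · rw [List.nodup_append]
        refine ⟨g2, h2, ?_⟩
        intro x hx y hy
        have := (h3 y hy).2
        rw [g1] at this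
        rintro rfl
        exact this (List.mem_append.mpr (Or.inr hx))
      · intro x hx
        rcases List.mem_append.mp hx with hx | hx
        · exact ⟨pvMem_deps rev c x (g3 x hx).1, (g3 x hx).2⟩
        · have := h3 x hx
          rw [g1] at this
          exact ⟨this.1, fun hin => this.2 (List.mem_append.mpr (Or.inl hin))⟩

theorem pvRem_append (rev : List (String × List String)) (imp new : List String)
    (hn : new.Nodup) (hx : ∀ x ∈ new, x ∈ pvU rev ∧ x ∉ imp) :
    pvRem rev (imp ++ new) + new.length = pvRem rev imp := by
  classical
  unfold pvRem
  set D := PySem.List.dedup (pvU rev) with hDdef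
  have hD : D.Nodup := PySem.List.nodup_dedup _
  set A0 := D.filter (fun x => decide (x ∉ imp)) with hA0
  have hA0nd : A0.Nodup := hD.filter _
  have hsplit : (D.filter (fun x => decide (x ∉ imp ++ new))) = A0.filter (fun x => decide (x ∉ new)) := by
    rw [hA0, List.filter_filter]
    apply List.filter_congr
    intro a _
    simp [List.mem_append]
    rw [Bool.and_comm]
  rw [hsplit]
  have hlen : (A0.filter (fun x => decide (x ∉ new))).length + (A0.filter (fun x => decide (x ∈ new))).length = A0.length := by
    rw [← List.countP_eq_length_filter, ← List.countP_eq_length_filter]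
    have h2 : A0.length = A0.countP (fun x => decide (x ∈ new)) + A0.countP (fun a => decide (¬ (fun x => decide (x ∈ new)) a = true)) := List.length_eq_countP_add_countP _
    rw [h2]
    have h3 : A0.countP (fun x => decide (x ∉ new)) = A0.countP (fun a => decide (¬ (fun x => decide (x ∈ new)) a = true)) := by
      apply List.countP_congr
      intro a _
      simp
    omega
  have hperm : (A0.filter (fun x => decide (x ∈ new))).Perm new := by
    rw [List.perm_ext_iff_of_nodup (hA0nd.filter _) hn]
    intro a
    simp only [List.mem_filter, decide_eq_true_eq]
    constructor
    · exact fun h => h.2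
    · intro h
      refine ⟨?_, h⟩
      rw [hA0]
      simp only [List.mem_filter, decide_eq_true_eq]
      exact ⟨by rw [hDdef]; exact (PySem.List.mem_dedup _ _).mpr (hx a h).1, (hx a h).2⟩
  have := hperm.length_eq
  omega

theorem pvLoopA_nil (rev : List (String × List String)) (fuel : Nat) (imp : List String) :
    pvLoopA rev fuel imp [] = imp := by cases fuel <;> rfl

theorem pvStepA_measure (rev : List (String × List String)) (c : String) (q imp : List String) :
    pvM rev ((pvDeps rev c).foldl pvVisit (imp, [])).1 (q ++ ((pvDeps rev c).foldl pvVisit (imp, [])).2) + 1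
      = pvM rev imp (c :: q) := by
  obtain ⟨h1, h2, h3⟩ := pvVisit_pkg (pvDeps rev c) imp
  have hrem := pvRem_append rev imp _ h2 (fun x hx => ⟨pvMem_deps rev c x (h3 x hx).1, (h3 x hx).2⟩)
  unfold pvM
  rw [h1]
  simp only [List.length_append, List.length_cons]
  omega

theorem pvLoopA_ge (rev : List (String × List String)) :
    ∀ fuel imp q, pvM rev imp q ≤ fuel → pvLoopA rev fuel imp q = pvLoopA rev (pvM rev imp q) imp q := by
  intro fuel
  induction fuel with
  | zero =>
      intro imp q h
      have : q = [] := by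
        unfold pvM at h
        cases q with
        | nil => rfl
        | cons a b => simp at h
      subst this
      rw [pvLoopA_nil, pvLoopA_nil]
  | succ f ih =>
      intro imp q h
      cases q with
      | nil => rw [pvLoopA_nil, pvLoopA_nil]
      | cons c q' =>
          have hm := pvStepA_measure rev c q' imp
          have hmq : pvM rev imp (c :: q') = pvM rev ((pvDeps rev c).foldl pvVisit (imp, [])).1 (q' ++ ((pvDeps rev c).foldl pvVisit (imp, [])).2) + 1 := hm.symm
          rw [hmq]
          show pvLoopA rev (f+1) imp (c :: q') = _
          simp only [pvLoopA]
          rw [pvVisit_shift (pvDeps rev c) imp q']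
          have hle : pvM rev ((pvDeps rev c).foldl pvVisit (imp, [])).1 (q' ++ ((pvDeps rev c).foldl pvVisit (imp, [])).2) ≤ f := by omega
          exact ih _ _ hle

theorem pvA_run (rev : List (String × List String)) :
    ∀ (f : List String) (imp t : List String) (fuel : Nat),
      pvLoopA rev (f.length + fuel) imp (f ++ t) =
        pvLoopA rev fuel (pvRound rev imp f).1 (t ++ (pvRound rev imp f).2) := by
  intro f
  induction f with
  | nil => intro imp t fuel; simp [pvRound]
  | cons c f' ih =>
      intro imp t fuel
      have hshape : (c :: f').length + fuel = (f'.length + fuel) + 1 := by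
        simp [List.length_cons]; omega
      rw [hshape]
      show pvLoopA rev ((f'.length + fuel) + 1) imp (c :: (f' ++ t)) = _
      simp only [pvLoopA]
      rw [pvVisit_shift (pvDeps rev c) imp (f' ++ t)]
      have : (f' ++ t) ++ ((pvDeps rev c).foldl pvVisit (imp, [])).2
           = f' ++ (t ++ ((pvDeps rev c).foldl pvVisit (imp, [])).2) := by simp
      rw [this, ih _ _ fuel]
      congr 1
      · show (pvRound rev ((pvDeps rev c).foldl pvVisit (imp,[])).1 f').1 = (pvRound rev imp (c :: f')).1
        simp only [pvRound, List.foldl_cons]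
        rw [pvVisit_shift (pvDeps rev c) imp []]
        rw [pvRound_shift rev f' _ ([] ++ _)]
        rfl
      · show t ++ ((pvDeps rev c).foldl pvVisit (imp,[])).2 ++ (pvRound rev ((pvDeps rev c).foldl pvVisit (imp,[])).1 f').2
             = t ++ (pvRound rev imp (c :: f')).2
        simp only [pvRound, List.foldl_cons]
        rw [pvVisit_shift (pvDeps rev c) imp []]
        rw [pvRound_shift rev f' _ ([] ++ _)]
        simp [pvRound]

theorem pvRound_measure (rev : List (String × List String)) (f imp : List String) :
    pvM rev (pvRound rev imp f).1 (pvRound rev imp f).2 + f.length = pvM rev imp f := by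
  obtain ⟨h1, h2, h3⟩ := pvRound_pkg rev f imp
  have hrem := pvRem_append rev imp _ h2 h3
  unfold pvM
  rw [h1]
  omega

theorem pvRem_le_sum (rev : List (String × List String)) (s : List String) :
    pvRem rev s ≤ (rev.map (fun p => p.2.length)).sum := by
  have h1 : pvRem rev s ≤ (PySem.List.dedup (pvU rev)).length := List.length_filter_le _ _
  have h2 : (PySem.List.dedup (pvU rev)).length ≤ (pvU rev).length := by
    rw [PySem.List.dedup_eq_ofList]
    exact PySem.Set.length_ofList_le _
  have h3 : (pvU rev).length = (rev.map (fun p => p.2.length)).sum := by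
    unfold pvU
    rw [List.length_flatten]
    congr 1
    simp [List.map_map, Function.comp]
  omega

theorem pvM_le_fuel (changed : List String) (rev : List (String × List String)) :
    pvM rev (PySem.Set.ofList changed) changed ≤ pvFuel changed rev := by
  have := pvRem_le_sum rev (PySem.Set.ofList changed)
  unfold pvM pvFuel
  omega

-- (pvVisit st d).1 ignores the accumulator: it is Set.add
theorem pvVisit_fst (st : PySem.Set String × List String) (d : String) :
    (pvVisit st d).1 = PySem.Set.add st.1 d := by
  unfold pvVisit PySem.Set.add
  split <;> simp_all

theorem pvFst_foldl (l : List String) (st : PySem.Set String × List String) :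
    (l.foldl pvVisit st).1 = PySem.Set.update st.1 l := by
  induction l generalizing st with
  | nil => simp [PySem.Set.update]
  | cons h t ih =>
      simp only [List.foldl_cons, PySem.Set.update]
      rw [ih (pvVisit st h), pvVisit_fst]
      rfl

-- the set-only fold of B's round equals the first component of the pair fold
theorem pvImage_fold (rev : List (String × List String)) (l : List String)
    (s : PySem.Set String) (acc : List String) :
    l.foldl (fun nxt node => PySem.Set.update nxt (pvDeps rev node)) s =
      (l.foldl (fun st cur => (pvDeps rev cur).foldl pvVisit st) (s, acc)).1 := by
  induction l generalizing s acc with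
  | nil => rfl
  | cons h t ih =>
      simp only [List.foldl_cons]
      have hpair : (pvDeps rev h).foldl pvVisit (s, acc)
          = (PySem.Set.update s (pvDeps rev h), ((pvDeps rev h).foldl pvVisit (s, acc)).2) := by
        have h1 := pvFst_foldl (pvDeps rev h) (s, acc)
        exact Prod.ext h1 rfl
      rw [hpair]
      exact ih _ _

-- folding a node whose deps are all present changes nothing
theorem pvAbsorb_visit (l : List String) (st : PySem.Set String × List String)
    (h : ∀ d ∈ l, d ∈ st.1) : l.foldl pvVisit st = st := by
  induction l with
  | nil => rfl
  | cons hd t ih =>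
      have hc : PySem.Set.contains st.1 hd = true := by
        simp [PySem.Set.contains]
        exact h hd List.mem_cons_self
      simp only [List.foldl_cons, pvVisit, hc, if_true]
      exact ih (fun d hd' => h d (List.mem_cons_of_mem _ hd'))

theorem pvMono_visit (l : List String) (st : PySem.Set String × List String) (x : String)
    (hx : x ∈ st.1) : x ∈ (l.foldl pvVisit st).1 := by
  induction l generalizing st with
  | nil => exact hx
  | cons h t ih =>
      simp only [List.foldl_cons]
      apply ih
      rw [pvVisit_fst]
      exact (PySem.Set.mem_add _ _ _).mpr (Or.inl hx)

theorem pvPost_visit (l : List String) (st : PySem.Set String × List String) (d : String)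
    (hd : d ∈ l) : d ∈ (l.foldl pvVisit st).1 := by
  induction l generalizing st with
  | nil => cases hd
  | cons h t ih =>
      simp only [List.foldl_cons]
      rcases List.mem_cons.mp hd with rfl | hd'
      · apply pvMono_visit
        rw [pvVisit_fst]
        exact (PySem.Set.mem_add _ _ _).mpr (Or.inr rfl)
      · exact ih _ hd'

-- scanning nodes whose deps are all present is a no-op
theorem pvAbsorb_step (rev : List (String × List String)) (done : List String)
    (st : PySem.Set String × List String)
    (h : ∀ x ∈ done, ∀ d ∈ pvDeps rev x, d ∈ st.1) :
    done.foldl (fun s cur => (pvDeps rev cur).foldl pvVisit s) st = st := by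
  induction done with
  | nil => rfl
  | cons x t ih =>
      simp only [List.foldl_cons]
      rw [pvAbsorb_visit _ _ (h x List.mem_cons_self)]
      exact ih (fun y hy => h y (List.mem_cons_of_mem _ hy))

theorem pvMono_step (rev : List (String × List String)) (f : List String)
    (st : PySem.Set String × List String) (x : String) (hx : x ∈ st.1) :
    x ∈ (f.foldl (fun s cur => (pvDeps rev cur).foldl pvVisit s) st).1 := by
  induction f generalizing st with
  | nil => exact hx
  | cons c t ih =>
      simp only [List.foldl_cons]
      exact ih _ (pvMono_visit _ _ _ hx)

-- every dep of a scanned node lands in the resulting set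
theorem pvComplete_step (rev : List (String × List String)) (f : List String)
    (st : PySem.Set String × List String) (x : String) (hx : x ∈ f) (d : String)
    (hd : d ∈ pvDeps rev x) :
    d ∈ (f.foldl (fun s cur => (pvDeps rev cur).foldl pvVisit s) st).1 := by
  induction f generalizing st with
  | nil => cases hx
  | cons c t ih =>
      simp only [List.foldl_cons]
      rcases List.mem_cons.mp hx with rfl | hx'
      · exact pvMono_step rev t _ d (pvPost_visit _ _ _ hd)
      · exact ih _ hx'

theorem pvUpd_prefix (xs : List String) (s : PySem.Set String) :
    ∃ t, PySem.Set.update s xs = s ++ t := by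
  induction xs generalizing s with
  | nil => exact ⟨[], by simp [PySem.Set.update]⟩
  | cons x xs ih =>
      have hstep : PySem.Set.update s (x :: xs) = PySem.Set.update (PySem.Set.add s x) xs := rfl
      by_cases hc : x ∈ s
      · have : PySem.Set.add s x = s := by simp [PySem.Set.add, hc]
        rw [hstep, this]; exact ih s
      · have hadd : PySem.Set.add s x = s ++ [x] := by simp [PySem.Set.add, hc]
        obtain ⟨t, ht⟩ := ih (s ++ [x])
        exact ⟨x :: t, by rw [hstep, hadd, ht]; simp⟩

-- duplicate elimination: scanning q equals scanning the deduplicated continuation of pre,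
-- provided every element of pre has already been fully expanded into the state
theorem pvQ (rev : List (String × List String)) (q : List String) :
    ∀ (pre : List String) (st : PySem.Set String × List String) (d : List String),
      (∀ x ∈ pre, ∀ dd ∈ pvDeps rev x, dd ∈ st.1) →
      pre ++ d = PySem.Set.update pre q →
      q.foldl (fun s cur => (pvDeps rev cur).foldl pvVisit s) st
        = d.foldl (fun s cur => (pvDeps rev cur).foldl pvVisit s) st := by
  induction q with
  | nil =>
      intro pre st d _ hd
      have hnil : d = [] := by
        have h0 : pre ++ d = pre := by simpa [PySem.Set.update] using hd
        have := congrArg List.length h0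
        simp at this
        exact this
      subst hnil
      rfl
  | cons x q' ih =>
      intro pre st d hH hd
      have hupd : PySem.Set.update pre (x :: q') = PySem.Set.update (PySem.Set.add pre x) q' := rfl
      by_cases hc : x ∈ pre
      · have hadd : PySem.Set.add pre x = pre := by simp [PySem.Set.add, hc]
        simp only [List.foldl_cons]
        rw [pvAbsorb_visit _ _ (hH x hc)]
        exact ih pre st d hH (by rw [hd, hupd, hadd])
      · have hadd : PySem.Set.add pre x = pre ++ [x] := by simp [PySem.Set.add, hc]
        obtain ⟨t, ht⟩ := pvUpd_prefix q' (pre ++ [x])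
        have hd' : d = x :: t := by
          apply List.append_cancel_left (as := pre)
          rw [hd, hupd, hadd, ht]
          simp
        subst hd'
        simp only [List.foldl_cons]
        apply ih (pre ++ [x]) ((pvDeps rev x).foldl pvVisit st) t
        · intro y hy dd hdd
          rcases List.mem_append.mp hy with h | h
          · exact pvMono_visit _ _ _ (hH y h dd hdd)
          · simp only [List.mem_singleton] at h; subst h
            exact pvPost_visit _ _ _ hdd
        · rw [ht]

-- B's round on a set split as done ++ f (done already expanded) is exactly A's round on f
theorem pvImage_round (rev : List (String × List String)) (done f : List String)
    (hnd : (done ++ f).Nodup)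
    (hdone : ∀ x ∈ done, ∀ dd ∈ pvDeps rev x, dd ∈ done ++ f) :
    pvImage rev (done ++ f) = (pvRound rev (done ++ f) f).1 := by
  unfold pvImage pvRound
  rw [PySem.Set.ofList_eq_self_of_nodup _ hnd]
  rw [pvImage_fold rev (done ++ f) (done ++ f) []]
  rw [List.foldl_append]
  rw [pvAbsorb_step rev done (done ++ f, []) (by intro x hx dd hdd; exact hdone x hx dd hdd)]

-- the B loop, from a set split as done ++ f, runs A's loop with queue f
theorem pvBtoA (rev : List (String × List String)) :
    ∀ (fuel : Nat) (done f : List String),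
      (done ++ f).Nodup →
      (∀ x ∈ done, ∀ dd ∈ pvDeps rev x, dd ∈ done ++ f) →
      pvRem rev (done ++ f) + 1 ≤ fuel →
      pvLoopB rev fuel (done ++ f) = pvLoopA rev (pvM rev (done ++ f) f) (done ++ f) f := by
  intro fuel
  induction fuel with
  | zero => intro done f _ _ hle; omega
  | succ n ih =>
      intro done f hnd hdone hle
      have himg : pvImage rev (done ++ f) = (pvRound rev (done ++ f) f).1 :=
        pvImage_round rev done f hnd hdone
      obtain ⟨p1, p2, p3⟩ := pvRound_pkg rev f (done ++ f)
      set imp := done ++ f with himp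
      set n2 := (pvRound rev imp f).2 with hn2
      show pvLoopB rev (n+1) imp = pvLoopA rev (pvM rev imp f) imp f
      simp only [pvLoopB]
      rw [himg, p1]
      by_cases h2 : n2 = []
      · rw [h2, List.append_nil, if_pos rfl]
        have hM : pvM rev imp f = f.length + pvRem rev imp := rfl
        rw [hM]
        have := pvA_run rev f imp [] (pvRem rev imp)
        rw [List.append_nil] at this
        rw [this, p1, h2, List.append_nil]
        rw [← hn2, h2, List.nil_append, pvLoopA_nil]
      · have hne : ¬ (PySem.Set.len (imp ++ n2) = PySem.Set.len imp) := by
          have : 0 < n2.length := List.length_pos_iff.mpr h2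
          simp only [PySem.Set.len, List.length_append]
          intro hq
          omega
        rw [if_neg hne]
        have hrem := pvRem_append rev imp n2 p2 p3
        have hnd' : (imp ++ n2).Nodup := by
          rw [List.nodup_append]
          refine ⟨hnd, p2, ?_⟩
          intro a ha b hb
          rintro rfl
          exact (p3 a hb).2 ha
        have hdone' : ∀ x ∈ imp, ∀ dd ∈ pvDeps rev x, dd ∈ imp ++ n2 := by
          intro x hx dd hdd
          rcases List.mem_append.mp hx with h | h
          · exact List.mem_append.mpr (Or.inl (hdone x h dd hdd))
          · have := pvComplete_step rev f (imp, []) x h dd hdd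
            rw [show (f.foldl (fun s cur => (pvDeps rev cur).foldl pvVisit s) (imp, [])).1
                  = (pvRound rev imp f).1 from rfl, p1] at this
            exact this
        have hle' : pvRem rev (imp ++ n2) + 1 ≤ n := by
          have : 0 < n2.length := List.length_pos_iff.mpr h2
          omega
        have hrun := ih imp n2 hnd' hdone' hle'
        rw [hrun]
        have hMdec := pvRound_measure rev f imp
        rw [p1, ← hn2] at hMdec
        have hM : pvM rev imp f = f.length + pvM rev (imp ++ n2) n2 := by omega
        rw [hM]
        have h3 := pvA_run rev f imp [] (pvM rev (imp ++ n2) n2)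
        rw [List.append_nil, List.nil_append] at h3
        rw [h3, p1, ← hn2]

theorem pvRemFuel (changed : List String) (rev : List (String × List String)) :
    pvRem rev (PySem.Set.ofList changed) + 1 ≤ pvFuel changed rev := by
  have := pvRem_le_sum rev (PySem.Set.ofList changed)
  unfold pvFuel
  omega

-- scanning the raw changed list equals scanning its deduplication
theorem pvRound_dedup (changed : List String) (rev : List (String × List String)) :
    pvRound rev (PySem.Set.ofList changed) changed
      = pvRound rev (PySem.Set.ofList changed) (PySem.Set.ofList changed) := by
  unfold pvRound
  apply pvQ rev changed []
  · intro x hx; cases hx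
  · rw [PySem.Set.update_nil_left]
    simp

-- ===== VERDICT (by name: the statement is the Claim_ definition above) =====
theorem impacted_modules_spec : Claim_equal_impacted_modules := by
  intro changed rev _
  unfold Spec_impacted_modules impacted_modules impacted_modules_alt
  set imp0 := PySem.Set.ofList changed with himp0
  -- B side: run the fixpoint loop as A's loop on the deduplicated queue
  have hB : pvLoopB rev (pvFuel changed rev) imp0
      = pvLoopA rev (pvM rev imp0 imp0) imp0 imp0 := by
    have := pvBtoA rev (pvFuel changed rev) [] imp0
      (by simp only [List.nil_append]; exact PySem.Set.nodup_ofList changed)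
      (by intro x hx; cases hx)
      (by simpa using pvRemFuel changed rev)
    simpa using this
  rw [hB]
  -- A side: normalise the fuel, then run one level of each and identify the states
  rw [pvLoopA_ge rev _ _ _ (pvM_le_fuel changed rev)]
  have hQ : pvRound rev imp0 changed = pvRound rev imp0 imp0 := pvRound_dedup changed rev
  have hMA := pvRound_measure rev changed imp0
  have hMB := pvRound_measure rev imp0 imp0
  have hA : pvM rev imp0 changed
      = changed.length + pvM rev (pvRound rev imp0 changed).1 (pvRound rev imp0 changed).2 := by
    omega
  have hB2 : pvM rev imp0 imp0
      = imp0.length + pvM rev (pvRound rev imp0 changed).1 (pvRound rev imp0 changed).2 := by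
    rw [← hQ] at hMB
    omega
  rw [hA, hB2]
  have h1 := pvA_run rev changed imp0 [] (pvM rev (pvRound rev imp0 changed).1 (pvRound rev imp0 changed).2)
  have h2 := pvA_run rev imp0 imp0 [] (pvM rev (pvRound rev imp0 changed).1 (pvRound rev imp0 changed).2)
  rw [List.append_nil, List.nil_append] at h1 h2
  rw [h1, h2, hQ]
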